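-- pv_equiv track=rewrite | github.com/diegoriva5/FantaF1 | fantasy_optimizer_backup.py | build_track_event_order
-- ===== SOURCE A (Python) =====
-- def build_track_event_order(rows):
--     event_order = []
--     seen_tracks = set()
--
--     for row in rows:
--         track_name = (row.get("Track") or "").strip()
--         if not track_name or track_name in seen_tracks:
--             continue
--         seen_tracks.add(track_name)
--         event_order.append(track_name)
--
--     return event_order
-- ===== SOURCE B (Python) =====
-- def build_track_event_order(rows):
--     names = [name for row in rows if (name := (row.get("Track") or "").strip())]
--     order = []
--     while names:
--         head = names[0]
--         order.append(head)
--         names = [n for n in names[1:] if n != head]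
--     return order
-- ===== Notes on version B (the rewrite author's own statement) =====
-- stated objective: alternative
-- what changed: Replaces the seen-set single pass by a cleaning comprehension followed by a dedup loop that takes the current head and filters every later occurrence of it out of the remaining list, so no seen-set or membership test against an accumulator exists.
import Mathlib
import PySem

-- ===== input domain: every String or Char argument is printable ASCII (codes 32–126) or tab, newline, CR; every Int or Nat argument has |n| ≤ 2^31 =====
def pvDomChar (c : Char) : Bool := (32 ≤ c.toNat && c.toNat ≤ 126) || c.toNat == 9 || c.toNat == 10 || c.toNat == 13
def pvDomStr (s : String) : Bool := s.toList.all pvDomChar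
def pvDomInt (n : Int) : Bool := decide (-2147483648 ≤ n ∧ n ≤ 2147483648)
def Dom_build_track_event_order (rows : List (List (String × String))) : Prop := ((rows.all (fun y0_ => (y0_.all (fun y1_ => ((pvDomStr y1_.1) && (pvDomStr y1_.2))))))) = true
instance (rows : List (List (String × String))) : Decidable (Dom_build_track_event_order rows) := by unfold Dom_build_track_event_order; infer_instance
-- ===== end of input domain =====

-- B replaces A's fused seen-set pass by a cleaning comprehension plus a dedup loop that repeatedly
-- takes the head and filters all its later occurrences out of the remaining list (no seen-set at all).
-- ===== PORT A =====
def build_track_event_order (rows : List (List (String × String))) : List String :=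
  (rows.foldl (fun (st : List String × PySem.Set String) row =>
      let track_name := PySem.Str.strip ((PySem.Dict.get? (PySem.Dict.mk row) "Track").getD "")
      if track_name = "" ∨ PySem.Set.contains st.2 track_name then st
      else (st.1 ++ [track_name], PySem.Set.add st.2 track_name))
    ([], PySem.Set.empty)).1

-- ===== PORT B =====
-- B's while-loop: pop the head onto the output, drop its later occurrences from the rest.
def pvDedupLoop (out : List String) (names : List String) : List String :=
  match names with
  | [] => out
  | head :: rest => pvDedupLoop (out ++ [head]) (rest.filter (fun n => n ≠ head))
termination_by names.length
decreasing_by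
  simpa [Nat.lt_succ_iff] using le_trans (List.length_filter_le _ rest.attach) (by simp)

def build_track_event_order_alt (rows : List (List (String × String))) : List String :=
  pvDedupLoop []
    ((rows.map (fun row => PySem.Str.strip ((PySem.Dict.get? (PySem.Dict.mk row) "Track").getD ""))).filter
      (fun n => n ≠ ""))

-- ===== PRECONDITION & SPEC =====
def Spec_build_track_event_order (rows : List (List (String × String))) (out : List String) : Prop := out = build_track_event_order_alt rows
instance (rows : List (List (String × String))) (out : List String) : Decidable (Spec_build_track_event_order rows out) := by unfold Spec_build_track_event_order; infer_instance

-- ===== CLAIM (what is proved, stated in full; the proofs are below) =====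
def Claim_equal_build_track_event_order : Prop := ∀ (rows : List (List (String × String))), Dom_build_track_event_order rows → Spec_build_track_event_order rows (build_track_event_order rows)

-- ===== LEMMAS AND PROOFS =====

-- invariant for A's fold: started with output list = seen-set = s, it computes the Set.add fold
-- of the cleaned non-empty names over s
theorem pv_fold_inv (rows : List (List (String × String))) (s : PySem.Set String) :
    (rows.foldl (fun (st : List String × PySem.Set String) row =>
        let track_name := PySem.Str.strip ((PySem.Dict.get? (PySem.Dict.mk row) "Track").getD "")
        if track_name = "" ∨ PySem.Set.contains st.2 track_name then st
        else (st.1 ++ [track_name], PySem.Set.add st.2 track_name)) (s, s)).1 =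
      ((rows.map (fun row => PySem.Str.strip ((PySem.Dict.get? (PySem.Dict.mk row) "Track").getD ""))).filter
        (fun n => n ≠ "")).foldl PySem.Set.add s := by
  induction rows generalizing s with
  | nil => rfl
  | cons row rest ih =>
    simp only [PySem.Set.contains_iff, decide_not] at ih
    simp only [List.foldl_cons, List.map_cons, List.filter_cons, PySem.Set.contains_iff,
      decide_not]
    set n := PySem.Str.strip ((PySem.Dict.get? (PySem.Dict.mk row) "Track").getD "") with hn
    by_cases h0 : n = ""
    · simpa [h0] using ih s
    · by_cases hm : n ∈ s
      · have hadd : PySem.Set.add s n = s := by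
          simp [PySem.Set.add, hm]
        rw [if_pos (Or.inr hm)]
        simpa [h0, hadd] using ih s
      · have hadd : PySem.Set.add s n = s ++ [n] := by
          simp [PySem.Set.add, hm]
        rw [if_neg (by tauto)]
        simpa [h0, hadd] using ih (s ++ [n])

theorem pvDedupLoop_nil (out : List String) : pvDedupLoop out [] = out := by
  rw [pvDedupLoop.eq_def]

theorem pvDedupLoop_cons (out : List String) (x : String) (xs : List String) :
    pvDedupLoop out (x :: xs) = pvDedupLoop (out ++ [x]) (xs.filter (fun n => n ≠ x)) := by
  rw [pvDedupLoop.eq_def]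

-- the Set.add fold (= keep first occurrences) is B's pop-head-and-filter loop started on the
-- elements not already present
theorem pv_foldl_add_eq_dedupLoop (xs : List String) (s : List String) :
    List.foldl PySem.Set.add s xs = pvDedupLoop s (xs.filter (fun a => decide (a ∉ s))) := by
  induction xs generalizing s with
  | nil => simp [pvDedupLoop_nil]
  | cons x xs ih =>
    by_cases hm : x ∈ s
    · have hadd : PySem.Set.add s x = s := by simp [PySem.Set.add, hm]
      simpa [List.filter_cons, hm, hadd] using ih s
    · have hadd : PySem.Set.add s x = s ++ [x] := by simp [PySem.Set.add, hm]
      rw [List.filter_cons, if_pos (by simpa using hm), pvDedupLoop_cons,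
        List.filter_filter, List.foldl_cons, hadd, ih (s ++ [x])]
      congr 1
      apply List.filter_congr
      intro a _
      simp [and_comm]

theorem build_track_event_order_spec : Claim_equal_build_track_event_order := by
  intro rows _
  unfold Spec_build_track_event_order build_track_event_order build_track_event_order_alt
  rw [show (PySem.Set.empty : PySem.Set String) = ([] : List String) from rfl,
    pv_fold_inv rows [], pv_foldl_add_eq_dedupLoop]
  simp
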